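-- pv_equiv track=rewrite | github.com/HarishSuroju/AI-Exam-Preparation-Planner | backend/app/planner.py | _topic_coverage_count
-- ===== SOURCE A (Python) =====
-- def _topic_coverage_count(plan, topics):
--     tracked_topics = set(topics)
--     count = 0
--
--     for entry in plan:
--         for topic in entry.get("topic_breakdown", []):
--             if topic in tracked_topics:
--                 count += 1
--         for topic in entry.get("practice_focus", []):
--             if topic in tracked_topics:
--                 count += 1
--
--     return count
-- ===== SOURCE B (Python) =====
-- def _topic_coverage_count(plan, topics):
--     tally = {}
--     for entry in plan:
--         for topic in entry.get("topic_breakdown", []) + entry.get("practice_focus", []):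
--             tally[topic] = tally.get(topic, 0) + 1
--     return sum(tally.get(t, 0) for t in set(topics))
-- ===== Notes on version B (the rewrite author's own statement) =====
-- stated objective: alternative
-- what changed: B builds a per-topic frequency table (dict) over the whole plan in one pass and then sums the multiplicities of the distinct tracked topics in a second pass over set(topics), instead of testing set membership for every topic during the scan.
import Mathlib
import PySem

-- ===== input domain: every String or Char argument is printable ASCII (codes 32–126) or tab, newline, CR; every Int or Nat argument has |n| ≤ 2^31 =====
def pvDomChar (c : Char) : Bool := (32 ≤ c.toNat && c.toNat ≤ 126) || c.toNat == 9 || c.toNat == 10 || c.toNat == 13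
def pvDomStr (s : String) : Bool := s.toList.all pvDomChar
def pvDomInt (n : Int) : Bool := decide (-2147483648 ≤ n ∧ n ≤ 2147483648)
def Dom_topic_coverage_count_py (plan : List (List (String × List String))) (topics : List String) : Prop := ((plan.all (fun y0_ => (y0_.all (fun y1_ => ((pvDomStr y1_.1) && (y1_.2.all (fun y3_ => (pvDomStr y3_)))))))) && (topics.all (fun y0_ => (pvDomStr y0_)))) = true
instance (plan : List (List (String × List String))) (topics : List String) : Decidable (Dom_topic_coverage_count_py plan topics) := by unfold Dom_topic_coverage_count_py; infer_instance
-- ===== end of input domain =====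

-- B replaces per-element membership tests by a frequency dict built in one pass, summed over the distinct tracked topics (alternative decomposition; same cost).

-- ===== PORT A =====
def topic_coverage_count_py (plan : List (List (String × List String))) (topics : List String) : Int :=
  let tracked_topics : PySem.Set String := PySem.Set.ofList topics
  let count : Int := 0
  plan.foldl (fun count entry =>
    let count := ((PySem.Dict.mk entry).getD "topic_breakdown" []).foldl
      (fun c topic => if PySem.Set.contains tracked_topics topic then c + 1 else c) count
    ((PySem.Dict.mk entry).getD "practice_focus" []).foldl
      (fun c topic => if PySem.Set.contains tracked_topics topic then c + 1 else c) count) count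

-- ===== PORT B =====
def topic_coverage_count_py_alt (plan : List (List (String × List String))) (topics : List String) : Int :=
  let tally : PySem.Dict String Int := plan.foldl (fun d entry =>
    (((PySem.Dict.mk entry).getD "topic_breakdown" []) ++ ((PySem.Dict.mk entry).getD "practice_focus" [])).foldl
      (fun d topic => d.insert topic (d.getD topic 0 + 1)) d) PySem.Dict.empty
  (PySem.Set.ofList topics).foldl (fun s t => s + tally.getD t 0) 0

-- ===== PRECONDITION & SPEC =====
def Spec_topic_coverage_count_py (plan : List (List (String × List String))) (topics : List String) (out : Int) : Prop := out = topic_coverage_count_py_alt plan topics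
instance (plan : List (List (String × List String))) (topics : List String) (out : Int) : Decidable (Spec_topic_coverage_count_py plan topics out) := by unfold Spec_topic_coverage_count_py; infer_instance

-- ===== CLAIM (what is proved, stated in full; the proofs are below) =====
def Claim_equal_topic_coverage_count_py : Prop := ∀ (plan : List (List (String × List String))) (topics : List String), Dom_topic_coverage_count_py plan topics → Spec_topic_coverage_count_py plan topics (topic_coverage_count_py plan topics)

-- ===== LEMMAS AND PROOFS =====

-- A's inner loop over a list of topics adds the number of tracked hits
theorem pv_foldA (S : PySem.Set String) (L : List String) (c : Int) :
    L.foldl (fun c topic => if PySem.Set.contains S topic then c + 1 else c) c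
      = c + L.countP (fun topic => decide (topic ∈ S)) := by
  induction L generalizing c with
  | nil => simp
  | cons x xs ih =>
    rw [List.foldl_cons, List.countP_cons]
    have hc : PySem.Set.contains S x = decide (x ∈ S) := by
      simp [PySem.Set.contains]
    rw [hc, ih]
    by_cases hx : x ∈ S
    · simp [hx]; ring
    · simp [hx]

-- A equals the per-entry hit count summed over the flattened plan
theorem pv_A_eq_countP (plan : List (List (String × List String))) (topics : List String) :
    topic_coverage_count_py plan topics
      = (plan.flatMap (fun entry =>
          ((PySem.Dict.mk entry).getD "topic_breakdown" []) ++ ((PySem.Dict.mk entry).getD "practice_focus" []))).countP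
          (fun t => decide (t ∈ PySem.Set.ofList topics)) := by
  unfold topic_coverage_count_py
  generalize (PySem.Set.ofList topics) = S
  suffices h : ∀ (c : Int), plan.foldl (fun count entry =>
      ((PySem.Dict.mk entry).getD "practice_focus" []).foldl
        (fun c topic => if PySem.Set.contains S topic then c + 1 else c)
        (((PySem.Dict.mk entry).getD "topic_breakdown" []).foldl
          (fun c topic => if PySem.Set.contains S topic then c + 1 else c) count)) c
      = c + (plan.flatMap (fun entry =>
          ((PySem.Dict.mk entry).getD "topic_breakdown" []) ++ ((PySem.Dict.mk entry).getD "practice_focus" []))).countP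
          (fun t => decide (t ∈ S)) by
    simpa using h 0
  induction plan with
  | nil => simp
  | cons e es ih =>
    intro c
    rw [List.foldl_cons, ih, pv_foldA, pv_foldA, List.flatMap_cons]
    push_cast [List.countP_append]
    ring

-- B's tally looks up as the count in the flattened plan
theorem pv_tally_getD (plan : List (List (String × List String))) (d : PySem.Dict String Int) (t : String) :
    (plan.foldl (fun d entry =>
      (((PySem.Dict.mk entry).getD "topic_breakdown" []) ++ ((PySem.Dict.mk entry).getD "practice_focus" [])).foldl
        (fun d topic => d.insert topic (d.getD topic 0 + 1)) d) d).getD t 0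
      = d.getD t 0 + ((plan.flatMap (fun entry =>
          ((PySem.Dict.mk entry).getD "topic_breakdown" []) ++ ((PySem.Dict.mk entry).getD "practice_focus" []))).count t : Int) := by
  induction plan generalizing d with
  | nil => simp
  | cons e es ih =>
    rw [List.foldl_cons, ih, List.flatMap_cons, List.count_append,
      PySem.Dict.getD_foldl_insert_add_one]
    push_cast
    ring

-- summing counts of the elements of a Nodup list = counting members of that list
theorem pv_sum_counts (S F : List String) (hS : S.Nodup) (acc : Int) :
    S.foldl (fun s t => s + (F.count t : Int)) acc
      = acc + F.countP (fun x => decide (x ∈ S)) := by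
  induction S generalizing acc with
  | nil => simp
  | cons s0 S' ih =>
    have hnot : s0 ∉ S' := (List.nodup_cons.mp hS).1
    have hcnt : ∀ G : List String, G.countP (fun x => decide (x ∈ s0 :: S'))
        = G.count s0 + G.countP (fun x => decide (x ∈ S')) := by
      intro G
      induction G with
      | nil => simp
      | cons f G' ihG =>
        rw [List.countP_cons, List.countP_cons, List.count_cons, ihG]
        by_cases h0 : f = s0
        · subst h0
          simp [hnot]
          omega
        · by_cases h1 : f ∈ S'
          · simp [h0, h1]
            omega
          · simp [h0, h1]
    rw [List.foldl_cons, ih (List.nodup_cons.mp hS).2, hcnt]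
    push_cast
    ring

-- ===== VERDICT (by name: the statement is the Claim_ definition above) =====
theorem topic_coverage_count_py_spec : Claim_equal_topic_coverage_count_py := by
  intro plan topics _
  unfold Spec_topic_coverage_count_py topic_coverage_count_py_alt
  rw [pv_A_eq_countP]
  have hfold : ((PySem.Set.ofList topics).foldl (fun s t => s +
      ((plan.foldl (fun d entry =>
        (((PySem.Dict.mk entry).getD "topic_breakdown" []) ++ ((PySem.Dict.mk entry).getD "practice_focus" [])).foldl
          (fun d topic => d.insert topic (d.getD topic 0 + 1)) d) PySem.Dict.empty).getD t 0)) 0)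
      = ((PySem.Set.ofList topics).foldl (fun s t => s +
        (((plan.flatMap (fun entry =>
          ((PySem.Dict.mk entry).getD "topic_breakdown" []) ++ ((PySem.Dict.mk entry).getD "practice_focus" []))).count t : Int))) 0) := by
    apply PySem.List.foldl_congr_mem
    intro s t _
    rw [pv_tally_getD]
    simp
  rw [hfold, pv_sum_counts _ _ (PySem.Set.nodup_ofList topics) 0, zero_add]
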